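-- pv_equiv track=rewrite | github.com/selanyat/challenges | codewars/python/5kyu/3divisors.py | solution
-- ===== SOURCE A (Python) =====
-- def solution(n, m):
--
--     result = []
--
--     for value in range(n, m+1):
--         count = 0
--         for divisor in range(2, value):
--             if value % divisor == 0 and count <= 3:
--                 count += 1
--         if count == 3:
--             result.append(value)
--     return result
-- ===== SOURCE B (Python) =====
-- def solution(n, m):
--     result = []
--     for value in range(n, m + 1):
--         count = 0
--         d = 2
--         while d * d <= value:
--             if value % d == 0:
--                 count += 1 if d * d == value else 2
--             d += 1
--         if count == 3:
--             result.append(value)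
--     return result
-- ===== Notes on version B (the rewrite author's own statement) =====
-- stated objective: alternative
-- what changed: B counts each value's nontrivial divisors by trial division only up to sqrt(value), counting the divisor pair d and value//d at once, instead of A's scan of every candidate in range(2, value) with a capped counter.
import Mathlib
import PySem

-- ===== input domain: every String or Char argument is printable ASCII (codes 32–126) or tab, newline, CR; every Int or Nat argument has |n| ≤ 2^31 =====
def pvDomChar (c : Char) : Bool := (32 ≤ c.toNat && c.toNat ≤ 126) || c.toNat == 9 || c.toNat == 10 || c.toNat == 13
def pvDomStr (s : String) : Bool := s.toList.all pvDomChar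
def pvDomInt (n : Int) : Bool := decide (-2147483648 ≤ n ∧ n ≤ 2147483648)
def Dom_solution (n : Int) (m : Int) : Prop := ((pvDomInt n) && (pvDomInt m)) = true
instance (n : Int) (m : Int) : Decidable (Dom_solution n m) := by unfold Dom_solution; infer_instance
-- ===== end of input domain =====

-- B replaces A's full scan of range(2, value) by trial division up to sqrt(value),
-- counting each divisor pair (d, value//d) at once (objective: alternative).

-- ===== PORT A =====
def solution (n : Int) (m : Int) : List Int :=
  (PySem.List.pyRange n (m + 1) 1).foldl (fun result value =>
    let count : Int := (PySem.List.pyRange 2 value 1).foldl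
      (fun count divisor =>
        if PySem.Int.mod value divisor = 0 ∧ count ≤ 3 then count + 1 else count) 0
    if count = 3 then result ++ [value] else result) []

-- ===== PORT B =====
-- the 'while d * d <= value' loop of Source B
def pvCountFrom (value : Int) (d : Int) (count : Int) : Int :=
  if _h : d * d ≤ value then
    pvCountFrom value (d + 1)
      (if PySem.Int.mod value d = 0 then
        (if d * d = value then count + 1 else count + 2) else count)
  else count
termination_by (value + 1 - d).toNat
decreasing_by
  have hdd : d ≤ d * d := by nlinarith [mul_self_nonneg (d - 1), mul_self_nonneg d]
  omega

def solution_alt (n : Int) (m : Int) : List Int :=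
  (PySem.List.pyRange n (m + 1) 1).foldl (fun result value =>
    let count : Int := pvCountFrom value 2 0
    if count = 3 then result ++ [value] else result) []

-- ===== PRECONDITION & SPEC =====
def Spec_solution (n : Int) (m : Int) (out : List Int) : Prop := out = solution_alt n m
instance (n : Int) (m : Int) (out : List Int) : Decidable (Spec_solution n m out) := by unfold Spec_solution; infer_instance

-- ===== CLAIM (what is proved, stated in full; the proofs are below) =====
def Claim_equal_solution : Prop := ∀ (n : Int) (m : Int), Dom_solution n m → Spec_solution n m (solution n m)

-- ===== LEMMAS AND PROOFS =====

-- weight of a divisor d ≤ sqrt N : it stands for itself and its cofactor N / d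
def pvW (N d : ℕ) : ℕ := if d * d = N then 1 else 2

-- divisors of N in [a, sqrt N]
def pvT (N a : ℕ) : Finset ℕ := (Finset.Ico a (N.sqrt + 1)).filter (· ∣ N)

-- divisors of N in [a, N)
def pvS (N a : ℕ) : Finset ℕ := (Finset.Ico a N).filter (· ∣ N)

-- the pairing d ↔ N / d : the number of divisors of N in [2, N) equals the
-- weighted count of divisors in [2, sqrt N]
lemma pv_pairing (N : ℕ) : (pvS N 2).card = (pvT N 2).sum (pvW N) := by
  have hsplit := Finset.filter_card_add_filter_neg_card_eq_card
    (s := pvS N 2) (p := fun d => d ≤ N.sqrt)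
  have h1 : (pvS N 2).filter (fun d => d ≤ N.sqrt) = pvT N 2 := by
    unfold pvS pvT
    ext d
    simp only [Finset.mem_filter, Finset.mem_Ico]
    constructor
    · rintro ⟨⟨⟨h2, _⟩, hd⟩, hs⟩
      exact ⟨⟨h2, by omega⟩, hd⟩
    · rintro ⟨⟨h2, hs⟩, hd⟩
      have hdd : d * d ≤ N := Nat.le_sqrt.mp (by omega)
      have h2d : 2 * d ≤ d * d := Nat.mul_le_mul_right d h2
      have hdN : d < N := lt_of_lt_of_le (by omega) (le_trans h2d hdd)
      exact ⟨⟨⟨h2, hdN⟩, hd⟩, by omega⟩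
  have h2c : ((pvS N 2).filter (fun d => ¬ d ≤ N.sqrt)).card
      = ((pvT N 2).filter (fun d => ¬ d * d = N)).card := by
    apply Finset.card_nbij' (i := fun e => N / e) (j := fun d => N / d)
    · intro e he
      simp only [Finset.mem_coe, pvS, pvT, Finset.mem_filter, Finset.mem_Ico] at he ⊢
      obtain ⟨⟨⟨h2, heN⟩, hd⟩, hs⟩ := he
      have hs' : N.sqrt < e := by omega
      have heq : N / e * e = N := Nat.div_mul_cancel hd
      have hq0 : N / e ≠ 0 := by intro h; rw [h, zero_mul] at heq; omega
      have hq1 : N / e ≠ 1 := by intro h; rw [h, one_mul] at heq; omega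
      have hNee : N < e * e := Nat.sqrt_lt.mp hs'
      have hqe : N / e < e := by
        by_contra hcon
        push_neg at hcon
        have : e * e ≤ N / e * e := Nat.mul_le_mul_right e hcon
        omega
      have hqq : N / e * (N / e) < N := by
        have h' : N / e * (N / e) < N / e * e :=
          mul_lt_mul_of_pos_left hqe (Nat.pos_of_ne_zero hq0)
        exact lt_of_lt_of_le h' heq.le
      have hqs : N / e ≤ N.sqrt := Nat.le_sqrt.mpr (le_of_lt hqq)
      have hq2 : 2 ≤ N / e := by
        cases hk : N / e with
        | zero => exact absurd hk hq0
        | succ k =>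
          cases k with
          | zero => exact absurd hk hq1
          | succ k' => omega
      exact ⟨⟨⟨hq2, Nat.lt_succ_of_le hqs⟩,
        Nat.div_dvd_of_dvd hd⟩, Nat.ne_of_lt hqq⟩
    · intro d hd
      simp only [Finset.mem_coe, pvS, pvT, Finset.mem_filter, Finset.mem_Ico] at hd ⊢
      obtain ⟨⟨⟨h2, hsle⟩, hdvd⟩, hne⟩ := hd
      have hdd : d * d ≤ N := Nat.le_sqrt.mp (by omega)
      have hddlt : d * d < N := lt_of_le_of_ne hdd hne
      have hN0 : 0 < N := by omega
      have heq : N / d * d = N := Nat.div_mul_cancel hdvd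
      have hdq : d < N / d := by
        by_contra hcon
        push_neg at hcon
        have : N / d * d ≤ d * d := Nat.mul_le_mul_right d hcon
        omega
      have hqN : N / d < N := Nat.div_lt_self hN0 (by omega)
      have hsq : N.sqrt < N / d := by
        apply Nat.sqrt_lt.mpr
        calc N = N / d * d := heq.symm
          _ < N / d * (N / d) := mul_lt_mul_of_pos_left hdq (by omega)
      exact ⟨⟨⟨by omega, hqN⟩, Nat.div_dvd_of_dvd hdvd⟩, by omega⟩
    · intro e he
      simp only [Finset.mem_coe, pvS, Finset.mem_filter, Finset.mem_Ico] at he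
      obtain ⟨⟨⟨h2, heN⟩, hdvd⟩, -⟩ := he
      exact Nat.div_div_self hdvd (by omega)
    · intro d hd
      simp only [Finset.mem_coe, pvT, Finset.mem_filter, Finset.mem_Ico] at hd
      obtain ⟨⟨⟨h2, hsle⟩, hdvd⟩, -⟩ := hd
      have h4 : 4 ≤ N := Nat.le_sqrt.mp (show 2 ≤ N.sqrt by omega)
      exact Nat.div_div_self hdvd (by omega)
  have hw : (pvT N 2).sum (pvW N)
      = (pvT N 2).card + ((pvT N 2).filter (fun d => ¬ d * d = N)).card := by
    rw [Finset.card_eq_sum_ones, Finset.card_filter, ← Finset.sum_add_distrib]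
    apply Finset.sum_congr rfl
    intro d _
    unfold pvW
    by_cases h : d * d = N <;> simp [h]
  rw [h1] at hsplit
  rw [hw, ← h2c]
  omega

-- B's loop computes the weighted count of divisors in [D, sqrt N]
lemma pvCountFrom_nat (fuel N D : ℕ) (c : Int) (hf : N + 1 - D ≤ fuel) (hD : 2 ≤ D) :
    pvCountFrom (N : Int) (D : Int) c = c + (((pvT N D).sum (pvW N) : ℕ) : ℤ) := by
  induction fuel generalizing D c with
  | zero =>
    have hDN : N < D := by omega
    have hDD : D ≤ D * D := Nat.le_mul_of_pos_left D (by omega)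
    have hg : ¬ ((D : Int) * D ≤ (N : Int)) := by
      have : (N : Int) < (D : Int) * D := by exact_mod_cast lt_of_lt_of_le hDN hDD
      exact not_le.mpr this
    rw [pvCountFrom, dif_neg hg]
    have hT : pvT N D = ∅ := by
      unfold pvT
      rw [Finset.Ico_eq_empty (by have := Nat.sqrt_le_self N; omega), Finset.filter_empty]
    rw [hT]; simp
  | succ fuel ih =>
    by_cases hg : D * D ≤ N
    · have hle : D ≤ N.sqrt := Nat.le_sqrt.mpr hg
      have hgi : ((D : Int) * D ≤ (N : Int)) := by exact_mod_cast hg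
      rw [pvCountFrom, dif_pos hgi]
      have hcast : ((D : Int) + 1) = ((D + 1 : ℕ) : Int) := by push_cast; ring
      rw [hcast, ih (D + 1) _ (by omega) (by omega)]
      have hT : pvT N D = if D ∣ N then insert D (pvT N (D + 1)) else pvT N (D + 1) := by
        unfold pvT
        rw [show Finset.Ico D (N.sqrt + 1) = insert D (Finset.Ico (D + 1) (N.sqrt + 1)) by
          ext x; simp only [Finset.mem_Ico, Finset.mem_insert]; omega, Finset.filter_insert]
      have hnotmem : D ∉ pvT N (D + 1) := by
        unfold pvT
        simp [Finset.mem_filter, Finset.mem_Ico]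
      have hdvd_iff : PySem.Int.mod (N : Int) (D : Int) = 0 ↔ D ∣ N := by
        rw [PySem.Int.mod_eq_zero_iff_dvd]
        exact Int.natCast_dvd_natCast
      have hsq_iff : ((D : Int) * D = (N : Int)) ↔ D * D = N := by
        constructor
        · intro h; exact_mod_cast h
        · intro h; exact_mod_cast h
      by_cases hdvd : D ∣ N
      · rw [hT, if_pos hdvd, Finset.sum_insert hnotmem, if_pos (hdvd_iff.mpr hdvd)]
        unfold pvW
        by_cases hsq : D * D = N
        · rw [if_pos (hsq_iff.mpr hsq), if_pos hsq]; push_cast; ring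
        · rw [if_neg (fun h => hsq (hsq_iff.mp h)), if_neg hsq]; push_cast; ring
      · rw [hT, if_neg hdvd, if_neg (fun h => hdvd (hdvd_iff.mp h))]
    · have hgi : ¬ ((D : Int) * D ≤ (N : Int)) := by
        intro h; exact hg (by exact_mod_cast h)
      rw [pvCountFrom, dif_neg hgi]
      have hT : pvT N D = ∅ := by
        unfold pvT
        rw [Finset.Ico_eq_empty (by have := Nat.sqrt_lt.mpr (by omega : N < D * D); omega),
          Finset.filter_empty]
      rw [hT]; simp

-- A's capped counter computes min(count, 4)
lemma pv_foldl_cap (v : Int) (l : List Int) (c : Int) (hc0 : 0 ≤ c) (hc4 : c ≤ 4) :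
    l.foldl (fun count divisor =>
        if PySem.Int.mod v divisor = 0 ∧ count ≤ 3 then count + 1 else count) c
      = min (c + (l.countP (fun d => decide (PySem.Int.mod v d = 0)) : ℤ)) 4 := by
  induction l generalizing c with
  | nil => simp; omega
  | cons hd tl ih =>
    simp only [List.foldl_cons, List.countP_cons]
    by_cases hp : PySem.Int.mod v hd = 0
    · by_cases h3 : c ≤ 3
      · rw [if_pos ⟨hp, h3⟩, ih (c + 1) (by omega) (by omega)]
        simp [hp]; omega
      · rw [if_neg (by tauto), ih c hc0 hc4]
        simp [hp]; omega
    · rw [if_neg (by tauto), ih c hc0 hc4]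
      simp [hp]

-- A's inner scan counts the divisors of N in [D, N)
lemma pv_countP_nat (fuel N D : ℕ) (hf : N - D ≤ fuel) :
    ((PySem.List.pyRange (D : Int) (N : Int) 1).countP
        (fun d => decide (PySem.Int.mod (N : Int) d = 0)) : ℤ)
      = ((pvS N D).card : ℤ) := by
  induction fuel generalizing D with
  | zero =>
    have hND : N ≤ D := by omega
    rw [PySem.List.pyRange_one_eq_nil (by exact_mod_cast hND)]
    have hS : pvS N D = ∅ := by
      unfold pvS
      rw [Finset.Ico_eq_empty (by omega), Finset.filter_empty]
    rw [hS]; simp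
  | succ fuel ih =>
    by_cases h : D < N
    · rw [PySem.List.pyRange_one_cons (by exact_mod_cast h), List.countP_cons]
      have hcast : ((D : Int) + 1) = ((D + 1 : ℕ) : Int) := by push_cast; ring
      rw [hcast]
      have hS : pvS N D = if D ∣ N then insert D (pvS N (D + 1)) else pvS N (D + 1) := by
        unfold pvS
        rw [show Finset.Ico D N = insert D (Finset.Ico (D + 1) N) by
          ext x; simp only [Finset.mem_Ico, Finset.mem_insert]; omega, Finset.filter_insert]
      have hnotmem : D ∉ pvS N (D + 1) := by
        unfold pvS
        simp [Finset.mem_filter, Finset.mem_Ico]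
      have hdvd_iff : PySem.Int.mod (N : Int) (D : Int) = 0 ↔ D ∣ N := by
        rw [PySem.Int.mod_eq_zero_iff_dvd]
        exact Int.natCast_dvd_natCast
      have hih := ih (D + 1) (by omega)
      by_cases hdvd : D ∣ N
      · rw [hS, if_pos hdvd, Finset.card_insert_of_notMem hnotmem,
          if_pos (by simp only [decide_eq_true_eq]; exact hdvd_iff.mpr hdvd)]
        push_cast at hih ⊢; omega
      · rw [hS, if_neg hdvd,
          if_neg (by simp only [decide_eq_true_eq]; exact fun hc => hdvd (hdvd_iff.mp hc))]
        push_cast at hih ⊢; omega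
    · rw [PySem.List.pyRange_one_eq_nil (by exact_mod_cast (by omega : N ≤ D))]
      have hS : pvS N D = ∅ := by
        unfold pvS
        rw [Finset.Ico_eq_empty (by omega), Finset.filter_empty]
      rw [hS]; simp

-- the per-value predicates of the two ports agree
lemma pv_pred_iff (v : Int) :
    ((PySem.List.pyRange 2 v 1).foldl
        (fun count divisor =>
          if PySem.Int.mod v divisor = 0 ∧ count ≤ 3 then count + 1 else count) (0 : Int) = 3)
      ↔ (pvCountFrom v 2 0 = 3) := by
  by_cases hv : 0 ≤ v
  · obtain ⟨N, rfl⟩ := Int.eq_ofNat_of_zero_le hv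
    rw [pv_foldl_cap _ _ 0 le_rfl (by omega)]
    have hA := pv_countP_nat N N 2 (by omega)
    have hB := pvCountFrom_nat (N + 1) N 2 0 (by omega) (by omega)
    rw [pv_pairing N] at hA
    push_cast at hA hB ⊢
    rw [hB, ← hA]
    omega
  · have hL : PySem.List.pyRange 2 v 1 = [] :=
      PySem.List.pyRange_one_eq_nil (by omega)
    have hR : pvCountFrom v 2 0 = 0 := by
      rw [pvCountFrom, dif_neg (by omega : ¬ (2 : Int) * 2 ≤ v)]
    rw [hL, hR]; simp

-- ===== VERDICT (by name: the statement is the Claim_ definition above) =====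
theorem solution_spec : Claim_equal_solution := by
  intro n m _
  unfold Spec_solution solution solution_alt
  apply PySem.List.foldl_congr_mem
  intro acc v _
  simp only []
  by_cases h : pvCountFrom v 2 0 = 3
  · rw [if_pos ((pv_pred_iff v).mpr h), if_pos h]
  · rw [if_neg (fun hc => h ((pv_pred_iff v).mp hc)), if_neg h]
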